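-- pv_equiv track=rewrite | github.com/Ovid/sqlitch-v2 | sqlitch/cli/commands/config.py | _remove_config_value
-- ===== SOURCE A (Python) =====
-- def _remove_config_value(
--     lines: list[str], section: str, option: str
-- ) -> tuple[list[str], bool]:
--     new_lines = list(lines)
--     start, end, header_index = _find_section_bounds(new_lines, section)
--     if start is None:
--         return new_lines, False
--
--     target_index = None
--     for idx in range(start, end):
--         stripped = new_lines[idx].strip()
--         if not stripped or stripped.startswith("#") or stripped.startswith(";"):
--             continue
--         key, sep, _ = stripped.partition("=")
--         if sep and key.strip() == option:
--             target_index = idx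
--             break
--
--     if target_index is None:
--         return new_lines, False
--
--     del new_lines[target_index]
--
--     if section != "DEFAULT" and header_index is not None:
--         section_has_entries = _section_has_entries(new_lines, header_index)
--         if not section_has_entries:
--             end_index = _find_next_section(new_lines, header_index + 1)
--             del new_lines[header_index:end_index]
--
--     return new_lines, True
--
-- def _find_section_bounds(
--     lines: list[str], section: str
-- ) -> tuple[int | None, int | None, int | None]:
--     if section == "DEFAULT":
--         start = 0
--         if lines and lines[0].strip().lower() == "[default]":
--             start = 1
--         end = _find_next_section(lines, start)
--         return start, end, None
--
--     header = f"[{section}]"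
--     for idx, line in enumerate(lines):
--         if line.strip() == header:
--             end = _find_next_section(lines, idx + 1)
--             return idx + 1, end, idx
--     return None, None, None
--
-- def _find_next_section(lines: list[str], start: int) -> int:
--     for idx in range(start, len(lines)):
--         stripped = lines[idx].strip()
--         if stripped.startswith("[") and stripped.endswith("]") and not stripped.startswith("#"):
--             return idx
--     return len(lines)
--
-- def _section_has_entries(lines: list[str], header_index: int) -> bool:
--     start = header_index + 1
--     end = _find_next_section(lines, start)
--     for idx in range(start, end):
--         stripped = lines[idx].strip()
--         if stripped and not stripped.startswith("#") and not stripped.startswith(";"):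
--             return True
--     return False
-- ===== SOURCE B (Python) =====
-- def _remove_config_value(lines, section, option):
--     if section == "DEFAULT":
--         if lines and lines[0].strip().lower() == "[default]":
--             body, removed = _strip_option(lines[1:], option)
--             return ([lines[0]] + body, True) if removed else (list(lines), False)
--         body, removed = _strip_option(lines, option)
--         return (body, True) if removed else (list(lines), False)
--     return _drop_in_section(lines, "[" + section + "]", option)
--
--
-- def _is_header(line):
--     s = line.strip()
--     return s.startswith("[") and s.endswith("]") and not s.startswith("#")
--
--
-- def _is_entry(line):
--     s = line.strip()
--     return bool(s) and not s.startswith("#") and not s.startswith(";")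
--
--
-- def _matches(line, option):
--     key, sep, _ = line.strip().partition("=")
--     return bool(sep) and key.strip() == option
--
--
-- def _strip_option(body, option):
--     """Rebuild body with the first matching 'option = ...' entry (before the
--     next section header) removed; flag says whether one was removed."""
--     out = []
--     for i, line in enumerate(body):
--         if _is_header(line):
--             break
--         if _is_entry(line) and _matches(line, option):
--             return out + body[i + 1:], True
--         out.append(line)
--     return list(body), False
--
--
-- def _until_next_header(body):
--     out = []
--     for line in body:
--         if _is_header(line):
--             break
--         out.append(line)
--     return out
--
--
-- def _drop_in_section(lines, header, option):
--     for i, line in enumerate(lines):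
--         if line.strip() == header:
--             body, removed = _strip_option(lines[i + 1:], option)
--             if not removed:
--                 return list(lines), False
--             kept = _until_next_header(body)
--             if any(_is_entry(l) for l in kept):
--                 return lines[:i + 1] + body, True
--             return lines[:i] + body[len(kept):], True
--     return list(lines), False
-- ===== Notes on version B (the rewrite author's own statement) =====
-- stated objective: alternative
-- what changed: B replaces A's index arithmetic (computing numeric section bounds with repeated _find_next_section scans, in-place del on a copied list, then re-scanning the mutated list for emptiness) with a rebuild decomposition: one helper finds the header and splices the rebuilt section body back, another rebuilds the body with the first matching entry dropped, and the empty-section rule is applied by splitting the body at the next header instead of recomputing bounds on the mutated list.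
import Mathlib
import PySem

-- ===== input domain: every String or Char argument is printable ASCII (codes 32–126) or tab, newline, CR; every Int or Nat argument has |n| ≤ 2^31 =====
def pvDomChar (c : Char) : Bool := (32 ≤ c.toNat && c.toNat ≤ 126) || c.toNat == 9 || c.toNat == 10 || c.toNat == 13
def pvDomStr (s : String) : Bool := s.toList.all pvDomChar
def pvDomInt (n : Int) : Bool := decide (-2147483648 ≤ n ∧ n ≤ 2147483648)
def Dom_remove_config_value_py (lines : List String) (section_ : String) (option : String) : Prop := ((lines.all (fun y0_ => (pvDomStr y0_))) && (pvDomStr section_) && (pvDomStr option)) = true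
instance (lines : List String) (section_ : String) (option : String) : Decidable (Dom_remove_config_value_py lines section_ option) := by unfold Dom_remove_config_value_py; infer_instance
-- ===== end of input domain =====

-- B rebuilds the result by structural splicing (find header, rebuild body with the entry
-- dropped, split at the next header for the empty-section rule) instead of A's numeric
-- bounds, in-place deletion and re-scan; objective: alternative decomposition, same cost.


-- shared helper: Python's s.partition("=") restricted to what both sources use of it —
-- (chars before the first '=', whether a '=' was found); exact, ported by hand (PySem has
-- no partition).
def pyPartitionEq : List Char → List Char × Bool
  | [] => ([], false)
  | c :: cs =>
    if c == '=' then ([], true)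
    else
      let kf := pyPartitionEq cs
      (c :: kf.1, kf.2)

-- ===== PORT A =====

-- the header test of _find_next_section's loop body
def isSectionHeaderLineA (l : String) : Bool :=
  let s := PySem.Str.strip l
  PySem.Str.startswith s "[" && PySem.Str.endswith s "]" && !PySem.Str.startswith s "#"

-- _find_next_section's 'for idx in range(start, len(lines))' as a scan of the suffix
def fnsAuxA : List String → Nat
  | [] => 0
  | l :: ls => if isSectionHeaderLineA l then 0 else fnsAuxA ls + 1

def findNextSectionA (lines : List String) (start : Nat) : Nat :=
  start + fnsAuxA (lines.drop start)

-- the 'for idx, line in enumerate(lines)' header search of _find_section_bounds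
def findHdrIdxA : List String → String → Option Nat
  | [], _ => none
  | l :: ls, h => if PySem.Str.strip l == h then some 0 else (findHdrIdxA ls h).map (· + 1)

-- _find_section_bounds; 'start is None' ⟺ the whole triple is none
def findSectionBoundsA (lines : List String) (section_ : String) : Option (Nat × Nat × Option Nat) :=
  if section_ == "DEFAULT" then
    let start := if !lines.isEmpty && PySem.Str.lower (PySem.Str.strip (lines.getD 0 "")) == "[default]" then 1 else 0
    some (start, findNextSectionA lines start, none)
  else
    match findHdrIdxA lines ("[" ++ section_ ++ "]") with
    | some idx => some (idx + 1, findNextSectionA lines (idx + 1), some idx)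
    | none => none

def isCommentOrBlankA (s : String) : Bool :=
  s == "" || PySem.Str.startswith s "#" || PySem.Str.startswith s ";"

-- the target-search loop 'for idx in range(start, end)'
def findTargetA (lines : List String) (opt : String) (idx stop : Nat) : Option Nat :=
  if _h : idx < stop then
    let stripped := PySem.Str.strip (lines.getD idx "")
    if isCommentOrBlankA stripped then findTargetA lines opt (idx + 1) stop
    else
      let ks := pyPartitionEq stripped.toList   -- (key, sep-found)
      if ks.2 && PySem.Chars.strip ks.1 == opt.toList then some idx
      else findTargetA lines opt (idx + 1) stop
  else none
termination_by stop - idx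

-- _section_has_entries' loop
def hasEntriesLoopA (lines : List String) (idx stop : Nat) : Bool :=
  if _h : idx < stop then
    if !isCommentOrBlankA (PySem.Str.strip (lines.getD idx "")) then true
    else hasEntriesLoopA lines (idx + 1) stop
  else false
termination_by stop - idx

def sectionHasEntriesA (lines : List String) (headerIdx : Nat) : Bool :=
  hasEntriesLoopA lines (headerIdx + 1) (findNextSectionA lines (headerIdx + 1))

def remove_config_value_py (lines : List String) (section_ : String) (option : String) : List String × Bool :=
  match findSectionBoundsA lines section_ with
  | none => (lines, false)
  | some (start, stop, headerIdx) =>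
    match findTargetA lines option start stop with
    | none => (lines, false)
    | some t =>
      let new_lines := lines.eraseIdx t
      if section_ != "DEFAULT" then
        match headerIdx with
        | some h =>
          if !sectionHasEntriesA new_lines h then
            let endIndex := findNextSectionA new_lines (h + 1)
            (new_lines.take h ++ new_lines.drop endIndex, true)
          else (new_lines, true)
        | none => (new_lines, true)
      else (new_lines, true)

-- ===== PORT B =====

def isHeaderB (line : String) : Bool :=
  let s := PySem.Str.strip line
  PySem.Str.startswith s "[" && PySem.Str.endswith s "]" && !PySem.Str.startswith s "#"

def isEntryB (line : String) : Bool :=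
  let s := PySem.Str.strip line
  !(s == "") && !PySem.Str.startswith s "#" && !PySem.Str.startswith s ";"

def matchesB (line : String) (opt : String) : Bool :=
  let ks := pyPartitionEq (PySem.Str.strip line).toList   -- (key, sep-found)
  ks.2 && PySem.Chars.strip ks.1 == opt.toList

-- _strip_option's accumulate-until loop, rebuilt as the structural recursion
def stripOptionB (opt : String) : List String → List String × Bool
  | [] => ([], false)
  | line :: rest =>
    if isHeaderB line then (line :: rest, false)
    else if isEntryB line && matchesB line opt then (rest, true)
    else
      let tr := stripOptionB opt rest
      (line :: tr.1, tr.2)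

-- _until_next_header's loop
def untilNextHeaderB : List String → List String
  | [] => []
  | line :: rest => if isHeaderB line then [] else line :: untilNextHeaderB rest

-- _drop_in_section's loop
def dropInSectionB (header opt : String) : List String → List String × Bool
  | [] => ([], false)
  | line :: rest =>
    if PySem.Str.strip line == header then
      let br := stripOptionB opt rest
      if !br.2 then (line :: rest, false)
      else
        let kept := untilNextHeaderB br.1
        if kept.any isEntryB then (line :: br.1, true)
        else (br.1.drop kept.length, true)
    else
      let tr := dropInSectionB header opt rest
      if tr.2 then (line :: tr.1, true) else (line :: rest, false)

def remove_config_value_py_alt (lines : List String) (section_ : String) (option : String) : List String × Bool :=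
  if section_ == "DEFAULT" then
    match lines with
    | [] => ([], false)   -- 'if lines and …' is false; _strip_option([]) removes nothing
    | l0 :: rest =>
      if PySem.Str.lower (PySem.Str.strip l0) == "[default]" then
        let br := stripOptionB option rest
        if br.2 then (l0 :: br.1, true) else (l0 :: rest, false)
      else
        let br := stripOptionB option (l0 :: rest)
        if br.2 then (br.1, true) else (l0 :: rest, false)
  else
    dropInSectionB ("[" ++ section_ ++ "]") option lines

-- ===== PRECONDITION & SPEC =====
def Spec_remove_config_value_py (lines : List String) (section_ : String) (option : String) (out : List String × Bool) : Prop := out = remove_config_value_py_alt lines section_ option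
instance (lines : List String) (section_ : String) (option : String) (out : List String × Bool) : Decidable (Spec_remove_config_value_py lines section_ option out) := by unfold Spec_remove_config_value_py; infer_instance

-- ===== CLAIM (what is proved, stated in full; the proofs are below) =====
def Claim_equal_remove_config_value_py : Prop := ∀ (lines : List String) (section_ : String) (option : String), Dom_remove_config_value_py lines section_ option → Spec_remove_config_value_py lines section_ option (remove_config_value_py lines section_ option)

-- ===== LEMMAS AND PROOFS =====

-- position (within a section body) of the first removable entry, shared characterisation
def auxT (opt : String) : List String → Option Nat
  | [] => none
  | l :: ls =>
    if isHeaderB l then none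
    else if isEntryB l && matchesB l opt then some 0
    else (auxT opt ls).map (· + 1)

theorem isSectionHeaderLineA_eq (l : String) : isSectionHeaderLineA l = isHeaderB l := rfl

theorem isEntryB_eq_not_commentBlank (l : String) :
    isEntryB l = !isCommentOrBlankA (PySem.Str.strip l) := by
  simp [isEntryB, isCommentOrBlankA]

theorem untilNextHeaderB_eq (body : List String) :
    untilNextHeaderB body = body.takeWhile (fun l => !isHeaderB l) := by
  induction body with
  | nil => rfl
  | cons l ls ih =>
    by_cases h : isHeaderB l <;> simp [untilNextHeaderB, h, ih]

theorem fnsAuxA_eq (ls : List String) :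
    fnsAuxA ls = (ls.takeWhile (fun l => !isHeaderB l)).length := by
  induction ls with
  | nil => rfl
  | cons l ls ih =>
    by_cases h : isHeaderB l <;>
      simp [fnsAuxA, isSectionHeaderLineA_eq, h, ih]

theorem getD_of_drop_cons {lines : List String} {idx : Nat} {l : String} {t : List String}
    (h : lines.drop idx = l :: t) : lines.getD idx "" = l := by
  have h1 : (lines.drop idx)[0]? = lines[idx + 0]? := List.getElem?_drop
  have h0 : lines[idx]? = some l := by simpa [h] using h1.symm
  simp [List.getD, h0]

theorem drop_succ_of_drop_cons {lines : List String} {idx : Nat} {l : String} {t : List String}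
    (h : lines.drop idx = l :: t) : lines.drop (idx + 1) = t := by
  have h2 : (lines.drop idx).drop 1 = lines.drop (idx + 1) := List.drop_drop
  rw [← h2, h]; rfl

theorem findTargetA_eq (opt : String) (body : List String) :
    ∀ (lines : List String) (idx : Nat), lines.drop idx = body →
      findTargetA lines opt idx (idx + fnsAuxA body) = (auxT opt body).map (idx + ·) := by
  induction body with
  | nil =>
    intro lines idx _
    rw [findTargetA]
    simp [fnsAuxA, auxT]
  | cons l t ih =>
    intro lines idx hdrop
    have hget : lines.getD idx "" = l := getD_of_drop_cons hdrop
    have hdrop' : lines.drop (idx + 1) = t := drop_succ_of_drop_cons hdrop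
    by_cases hhdr : isHeaderB l
    · rw [findTargetA]
      simp [fnsAuxA, isSectionHeaderLineA_eq, hhdr, auxT]
    · have hfns : fnsAuxA (l :: t) = fnsAuxA t + 1 := by
        simp [fnsAuxA, isSectionHeaderLineA_eq, hhdr]
      have harr : idx + fnsAuxA (l :: t) = (idx + 1) + fnsAuxA t := by rw [hfns]; omega
      rw [harr, findTargetA, dif_pos (by omega : idx < (idx + 1) + fnsAuxA t)]
      simp only [hget]
      have hrec := ih lines (idx + 1) hdrop'
      by_cases hcb : isCommentOrBlankA (PySem.Str.strip l)
      · have hent : isEntryB l = false := by simp [isEntryB_eq_not_commentBlank, hcb]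
        rw [if_pos hcb, hrec]
        have hauxT : auxT opt (l :: t) = (auxT opt t).map (· + 1) := by
          simp [auxT, hhdr, hent]
        rw [hauxT]
        cases auxT opt t <;> simp [Nat.add_comm, Nat.add_left_comm]
      · have hcb' : isCommentOrBlankA (PySem.Str.strip l) = false := by simpa using hcb
        have hent : isEntryB l = true := by simp [isEntryB_eq_not_commentBlank, hcb']
        rw [if_neg hcb]
        by_cases hm : matchesB l opt
        · rw [if_pos (by simpa [matchesB] using hm)]
          simp [auxT, hhdr, hent, hm]
        · have hm' : matchesB l opt = false := by simpa using hm
          rw [if_neg (by simpa [matchesB] using hm), hrec]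
          have hauxT : auxT opt (l :: t) = (auxT opt t).map (· + 1) := by
            simp [auxT, hhdr, hent, hm']
          rw [hauxT]
          cases auxT opt t <;> simp [Nat.add_comm, Nat.add_left_comm]

theorem hasEntriesLoopA_eq (body : List String) :
    ∀ (lines : List String) (idx : Nat), lines.drop idx = body →
      hasEntriesLoopA lines idx (idx + fnsAuxA body)
        = (body.takeWhile (fun l => !isHeaderB l)).any isEntryB := by
  induction body with
  | nil =>
    intro lines idx _
    rw [hasEntriesLoopA]
    simp [fnsAuxA]
  | cons l t ih =>
    intro lines idx hdrop
    have hget : lines.getD idx "" = l := getD_of_drop_cons hdrop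
    have hdrop' : lines.drop (idx + 1) = t := drop_succ_of_drop_cons hdrop
    by_cases hhdr : isHeaderB l
    · rw [hasEntriesLoopA]
      simp [fnsAuxA, isSectionHeaderLineA_eq, hhdr]
    · have hhdr' : isHeaderB l = false := by simpa using hhdr
      have harr : idx + fnsAuxA (l :: t) = (idx + 1) + fnsAuxA t := by
        simp [fnsAuxA, isSectionHeaderLineA_eq, hhdr']; omega
      rw [harr, hasEntriesLoopA, dif_pos (by omega : idx < (idx + 1) + fnsAuxA t)]
      simp only [hget]
      by_cases hcb : isCommentOrBlankA (PySem.Str.strip l)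
      · have hent : isEntryB l = false := by simp [isEntryB_eq_not_commentBlank, hcb]
        rw [if_neg (by simp [hcb]), ih lines (idx + 1) hdrop']
        simp [hhdr', hent]
      · have hcb' : isCommentOrBlankA (PySem.Str.strip l) = false := by simpa using hcb
        have hent : isEntryB l = true := by simp [isEntryB_eq_not_commentBlank, hcb']
        rw [if_pos (by simp [hcb'])]
        simp [hhdr', hent]

theorem stripOptionB_eq (opt : String) (body : List String) :
    stripOptionB opt body
      = (match auxT opt body with
         | none => (body, false)
         | some j => (body.eraseIdx j, true)) := by
  induction body with
  | nil => rfl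
  | cons l t ih =>
    by_cases hhdr : isHeaderB l
    · simp [stripOptionB, hhdr, auxT]
    · have hhdr' : isHeaderB l = false := by simpa using hhdr
      by_cases hm : isEntryB l && matchesB l opt
      · simp [stripOptionB, hhdr', hm, auxT]
      · have hm' : (isEntryB l && matchesB l opt) = false := by simpa using hm
        simp only [stripOptionB, hhdr', Bool.false_eq_true, if_false, hm', ih, auxT]
        cases auxT opt t <;> simp [List.eraseIdx_cons_succ]

-- the non-DEFAULT tail of both programs, as one spec function
-- kept prefix of a section body after removal (proof-side abbreviation)
def keptOf (body' : List String) : List String := body'.takeWhile (fun l => !isHeaderB l)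

def afterHdrSpec (opt : String) (h : Nat) (lines : List String) : List String × Bool :=
  match auxT opt (lines.drop (h + 1)) with
  | none => (lines, false)
  | some j =>
    if (keptOf ((lines.drop (h + 1)).eraseIdx j)).any isEntryB then
      (lines.take (h + 1) ++ (lines.drop (h + 1)).eraseIdx j, true)
    else
      (lines.take h ++ ((lines.drop (h + 1)).eraseIdx j).drop (keptOf ((lines.drop (h + 1)).eraseIdx j)).length, true)

theorem afterHdrSpec_cons (opt : String) (h : Nat) (line : String) (rest : List String) :
    afterHdrSpec opt (h + 1) (line :: rest)
      = (line :: (afterHdrSpec opt h rest).1, (afterHdrSpec opt h rest).2) := by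
  rcases haux : auxT opt (rest.drop (h + 1)) with _ | j
  · simp [afterHdrSpec, haux]
  · simp only [afterHdrSpec, List.drop_succ_cons, List.take_succ_cons, haux]
    split <;> simp

theorem afterHdrSpec_false (opt : String) (h : Nat) (lines : List String)
    (hf : (afterHdrSpec opt h lines).2 = false) : (afterHdrSpec opt h lines).1 = lines := by
  rcases haux : auxT opt (lines.drop (h + 1)) with _ | j
  · simp [afterHdrSpec, haux]
  · simp only [afterHdrSpec, haux] at hf
    split at hf <;> simp_all

theorem dropInSectionB_eq (header opt : String) (lines : List String) :
    dropInSectionB header opt lines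
      = (match findHdrIdxA lines header with
         | none => (lines, false)
         | some h => afterHdrSpec opt h lines) := by
  induction lines with
  | nil => rfl
  | cons line rest ih =>
    by_cases hh : PySem.Str.strip line == header
    · simp only [findHdrIdxA, hh, if_true]
      rcases haux : auxT opt rest with _ | j
      · simp [dropInSectionB, hh, stripOptionB_eq, haux, afterHdrSpec]
      · simp only [dropInSectionB, hh, if_true, stripOptionB_eq, haux, untilNextHeaderB_eq,
          Bool.not_true, Bool.false_eq_true, if_false]
        simp only [afterHdrSpec, List.drop_succ_cons, List.drop_zero, haux,
          List.take_succ_cons, List.take_zero, keptOf]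
        split <;> simp
    · have hh' : (PySem.Str.strip line == header) = false := by simpa using hh
      simp only [findHdrIdxA, hh', Bool.false_eq_true, if_false]
      rcases hfind : findHdrIdxA rest header with _ | h
      · simp [dropInSectionB, hh', ih, hfind]
      · simp only [Option.map_some]
        rw [afterHdrSpec_cons]
        have hB : dropInSectionB header opt rest = afterHdrSpec opt h rest := by
          rw [ih, hfind]
        simp only [dropInSectionB, hh', Bool.false_eq_true, if_false, hB]
        rcases hflag : (afterHdrSpec opt h rest).2
        · simp [afterHdrSpec_false _ _ _ hflag]
        · simp

theorem findHdrIdxA_lt {lines : List String} {header : String} {h : Nat}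
    (hh : findHdrIdxA lines header = some h) : h < lines.length := by
  induction lines generalizing h with
  | nil => simp [findHdrIdxA] at hh
  | cons l ls ih =>
    by_cases he : PySem.Str.strip l == header
    · simp [findHdrIdxA, he] at hh
      simp [← hh]
    · simp only [findHdrIdxA, he, Bool.false_eq_true, if_false, Option.map_eq_some_iff] at hh
      obtain ⟨a, ha, rfl⟩ := hh
      have := ih ha
      simp; omega

theorem eraseIdx_add_split {α : Type} (l : List α) (n j : Nat) :
    l.eraseIdx (n + j) = l.take n ++ (l.drop n).eraseIdx j := by
  rw [List.eraseIdx_eq_take_drop_succ, List.eraseIdx_eq_take_drop_succ, List.take_add]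
  rw [List.append_assoc, List.drop_drop]
  congr 3

theorem take_succ_append_take {α : Type} (lines X : List α) (h : Nat) (hlen : h < lines.length) :
    (lines.take (h + 1) ++ X).take h = lines.take h := by
  rw [List.take_append, List.take_take]
  have h0 : h - min (h + 1) lines.length = 0 := by omega
  simp [h0]

theorem A_nonDefault (lines : List String) (section_ : String) (opt : String)
    (hns : (section_ == "DEFAULT") = false) :
    remove_config_value_py lines section_ opt
      = (match findHdrIdxA lines ("[" ++ section_ ++ "]") with
         | none => (lines, false)
         | some h => afterHdrSpec opt h lines) := by
  unfold remove_config_value_py findSectionBoundsA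
  simp only [hns, Bool.false_eq_true, if_false]
  rcases hfind : findHdrIdxA lines ("[" ++ section_ ++ "]") with _ | h
  · rfl
  · have hlen : h < lines.length := findHdrIdxA_lt hfind
    have htgt := findTargetA_eq opt (lines.drop (h + 1)) lines (h + 1) rfl
    simp only [findNextSectionA]
    rcases haux : auxT opt (lines.drop (h + 1)) with _ | j
    · rw [htgt, haux]
      simp [afterHdrSpec, haux]
    · rw [htgt, haux]
      simp only [Option.map_some]
      have hbne : (section_ != "DEFAULT") = true := by simp [bne, hns]
      simp only [hbne, if_true]
      have hE : lines.eraseIdx (h + 1 + j)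
          = lines.take (h + 1) ++ (lines.drop (h + 1)).eraseIdx j :=
        eraseIdx_add_split lines (h + 1) j
      have hlentake : (lines.take (h + 1)).length = h + 1 := by
        simp [List.length_take]; omega
      have hdropE : (lines.eraseIdx (h + 1 + j)).drop (h + 1)
          = (lines.drop (h + 1)).eraseIdx j := by
        rw [hE]; exact List.drop_left' hlentake
      have hhe : sectionHasEntriesA (lines.eraseIdx (h + 1 + j)) h
          = (keptOf ((lines.drop (h + 1)).eraseIdx j)).any isEntryB := by
        unfold sectionHasEntriesA
        simp only [findNextSectionA, hdropE, keptOf]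
        exact hasEntriesLoopA_eq _ _ _ hdropE
      simp only [afterHdrSpec, haux]
      rcases hany : (keptOf ((lines.drop (h + 1)).eraseIdx j)).any isEntryB
      · simp only [hhe, hany, Bool.not_false, if_true, Bool.false_eq_true, if_false]
        rw [hE, take_succ_append_take _ _ _ hlen]
        have hdX : List.drop (h + 1) (List.take (h + 1) lines ++ (lines.drop (h + 1)).eraseIdx j)
            = (lines.drop (h + 1)).eraseIdx j := List.drop_left' hlentake
        rw [hdX, fnsAuxA_eq, ← List.drop_drop, hdX, keptOf]
      · simp only [hhe, hany, Bool.not_true, Bool.false_eq_true, if_false, if_true]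
        exact Prod.ext hE rfl

-- ===== VERDICT (by name: the statement is the Claim_ definition above) =====
theorem remove_config_value_py_spec : Claim_equal_remove_config_value_py := by
  intro lines section_ option _
  unfold Spec_remove_config_value_py
  by_cases hd : section_ == "DEFAULT"
  · unfold remove_config_value_py findSectionBoundsA remove_config_value_py_alt
    simp only [hd, if_true]
    cases lines with
    | nil =>
      have h0 : findTargetA [] option 0 (findNextSectionA [] 0) = none := by
        rw [findTargetA]
        simp [findNextSectionA, fnsAuxA]
      simp [h0]
    | cons l0 rest =>
      have hl0 : (l0 :: rest).getD 0 "" = l0 := rfl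
      rw [hl0]
      by_cases hdef : PySem.Str.lower (PySem.Str.strip l0) == "[default]"
      · simp only [hdef, List.isEmpty_cons, Bool.not_false, Bool.and_true, if_true,
          findNextSectionA, show List.drop 1 (l0 :: rest) = rest from rfl]
        have htgt := findTargetA_eq option rest (l0 :: rest) 1 rfl
        rw [htgt]
        rcases haux : auxT option rest with _ | j
        · simp [stripOptionB_eq, haux]
        · simp only [Option.map_some, stripOptionB_eq, haux]
          have hbne : (section_ != "DEFAULT") = false := by simp [bne, hd]
          simp only [hbne, Bool.false_eq_true, if_false, if_true]
          have h1j : 1 + j = j + 1 := Nat.add_comm 1 j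
          rw [h1j, List.eraseIdx_cons_succ]
      · have hdef' : (PySem.Str.lower (PySem.Str.strip l0) == "[default]") = false := by
          rcases hb : PySem.Str.lower (PySem.Str.strip l0) == "[default]"
          · rfl
          · exact absurd hb hdef
        simp only [hdef', Bool.and_false, Bool.false_eq_true, if_false, findNextSectionA,
          show List.drop 0 (l0 :: rest) = l0 :: rest from rfl]
        have htgt := findTargetA_eq option (l0 :: rest) (l0 :: rest) 0 rfl
        rw [htgt]
        rcases haux : auxT option (l0 :: rest) with _ | j
        · simp [stripOptionB_eq, haux]
        · simp only [Option.map_some, stripOptionB_eq, haux]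
          have hbne : (section_ != "DEFAULT") = false := by simp [bne, hd]
          simp only [hbne, Bool.false_eq_true, if_false, if_true, Nat.zero_add]
  · have hd' : (section_ == "DEFAULT") = false := by simpa using hd
    rw [A_nonDefault lines section_ option hd']
    unfold remove_config_value_py_alt
    simp only [hd', Bool.false_eq_true, if_false]
    rw [dropInSectionB_eq]
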